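-- pv_equiv track=rewrite | github.com/Jjiggu/CodingTest | 재연/Programmers/Level3/92344 파괴되지 않은 건물.py | solution
-- ===== SOURCE A (Python) =====
-- def solution(board, skill):
--     n = len(board)
--     m = len(board[0])
--     damage = [[0] * (m + 1) for _ in range(n + 1)]
--
--     for t, r1, c1, r2, c2, degree in skill:
--         if t == 1:
--             degree = -degree
--         damage[r1][c1] += degree
--         damage[r1][c2 + 1] -= degree
--         damage[r2 + 1][c1] -= degree
--         damage[r2 + 1][c2 + 1] += degree
--
--     for i in range(n):
--         for j in range(m):
--             damage[i][j + 1] += damage[i][j]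
--
--     for j in range(m):
--         for i in range(n):
--             damage[i + 1][j] += damage[i][j]
--
--     intact_count = 0
--     for i in range(n):
--         for j in range(m):
--             if board[i][j] + damage[i][j] > 0:
--                 intact_count += 1
--
--     return intact_count
-- ===== SOURCE B (Python) =====
-- def solution(board, skill):
--     count = 0
--     for i in range(len(board)):
--         for j in range(len(board[i])):
--             total = board[i][j]
--             for s in skill:
--                 t, r1, c1, r2, c2, d = s
--                 if r1 <= i <= r2 and c1 <= j <= c2:
--                     total += -d if t == 1 else d
--             if total > 0:
--                 count += 1
--     return count
-- ===== Notes on version B (the rewrite author's own statement) =====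
-- stated objective: simpler
-- what changed: Replaces the 2D difference array with corner updates and two prefix-sum sweeps by a direct per-cell pass that sums each skill's signed degree over the cells of its rectangle, with no auxiliary grid.
-- outside the precondition, e.g. on solution([[1]], [[1, -1, -1, -1, -1, 1]]): A returns 0, B returns 1; on solution([[1], [2, 3]], []): A returns 2, B returns 3
import Mathlib
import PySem

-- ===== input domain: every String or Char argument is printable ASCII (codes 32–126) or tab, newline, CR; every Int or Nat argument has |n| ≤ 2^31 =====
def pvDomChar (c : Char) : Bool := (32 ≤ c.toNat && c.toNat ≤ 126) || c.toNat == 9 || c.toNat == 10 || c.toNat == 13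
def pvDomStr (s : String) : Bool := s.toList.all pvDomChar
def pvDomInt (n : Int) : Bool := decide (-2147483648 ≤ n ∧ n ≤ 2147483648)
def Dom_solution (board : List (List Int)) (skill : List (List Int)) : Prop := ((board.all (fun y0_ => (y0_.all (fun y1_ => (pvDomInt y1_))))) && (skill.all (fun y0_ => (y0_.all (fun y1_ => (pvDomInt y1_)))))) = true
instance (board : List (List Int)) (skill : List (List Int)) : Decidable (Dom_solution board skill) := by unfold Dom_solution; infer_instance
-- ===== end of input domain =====

-- B drops A's 2D difference array and prefix-sum sweeps for a direct per-cell pass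
-- that sums each skill's signed degree over its rectangle (objective: simpler; not faster).

-- ===== PORT A =====
-- grid read: damage[i][j] (indices are in range under Pre_solution; default 0 otherwise)
def pvGet2 (d : List (List Int)) (i j : Nat) : Int := (d.getD i []).getD j 0

-- grid write with Nat indices: damage[i][j] += δ
def pvAddN (d : List (List Int)) (i j : Nat) (δ : Int) : List (List Int) :=
  d.modify i (fun row => row.modify j (fun x => x + δ))

-- grid write with Python Int indices: negative indices wrap like Python's;
-- an out-of-range index is a no-op where Python raises IndexError (excluded by Pre_solution)
def pvAddI (d : List (List Int)) (i j : Int) (δ : Int) : List (List Int) :=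
  d.modify (if i < 0 then (i + d.length).toNat else i.toNat)
    (fun row => row.modify (if j < 0 then (j + row.length).toNat else j.toNat) (fun x => x + δ))

-- one iteration of `for t, r1, c1, r2, c2, degree in skill:` (wrong arity would raise; Pre_ excludes)
def pvApplySkill (d : List (List Int)) (s : List Int) : List (List Int) :=
  match s with
  | [t, r1, c1, r2, c2, degree0] =>
    let degree := if t = 1 then -degree0 else degree0
    let d := pvAddI d r1 c1 degree
    let d := pvAddI d r1 (c2 + 1) (-degree)
    let d := pvAddI d (r2 + 1) c1 (-degree)
    pvAddI d (r2 + 1) (c2 + 1) degree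
  | _ => d

def solution (board : List (List Int)) (skill : List (List Int)) : Int :=
  let n := board.length
  let m := (board.getD 0 []).length
  let damage0 : List (List Int) := List.replicate (n + 1) (List.replicate (m + 1) 0)
  let damage1 := skill.foldl pvApplySkill damage0
  let damage2 := (List.range n).foldl (fun d i =>
    (List.range m).foldl (fun d j => pvAddN d i (j + 1) (pvGet2 d i j)) d) damage1
  let damage3 := (List.range m).foldl (fun d j =>
    (List.range n).foldl (fun d i => pvAddN d (i + 1) j (pvGet2 d i j)) d) damage2
  (List.range n).foldl (fun cnt i =>
    (List.range m).foldl (fun cnt j =>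
      if (board.getD i []).getD j 0 + pvGet2 damage3 i j > 0 then cnt + 1 else cnt) cnt) 0

-- ===== PORT B =====
-- inner loop `for s in skill: t,r1,c1,r2,c2,d = s; if in rectangle: total += …`
def pvCellTotal (skill : List (List Int)) (i j : Int) (v : Int) : Int :=
  skill.foldl (fun tot s =>
    match s with
    | [t, r1, c1, r2, c2, d] =>
      if r1 ≤ i ∧ i ≤ r2 ∧ c1 ≤ j ∧ j ≤ c2 then tot + (if t = 1 then -d else d) else tot
    | _ => tot) v

def solution_alt (board : List (List Int)) (skill : List (List Int)) : Int :=
  (List.range board.length).foldl (fun cnt (i : Nat) =>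
    (List.range (board.getD i []).length).foldl (fun cnt (j : Nat) =>
      if pvCellTotal skill (i : Int) (j : Int) ((board.getD i []).getD j 0) > 0 then cnt + 1 else cnt) cnt) 0

-- ===== PRECONDITION & SPEC =====
-- Pre_solution restricts to the task's natural domain: a nonempty rectangular board and
-- skills [t,r1,c1,r2,c2,d] with 0 ≤ r1 ≤ r2 < n and 0 ≤ c1 ≤ c2 < m. Outside it A raises
-- (empty board, short rows, wrong-arity or out-of-range skills) or, for negative in-range
-- skill coordinates and ragged over-long rows, returns wraparound/truncation artefacts.
def Pre_solution (board : List (List Int)) (skill : List (List Int)) : Prop :=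
  board ≠ [] ∧
  (∀ row ∈ board, row.length = (board.getD 0 []).length) ∧
  (∀ s ∈ skill, s.length = 6 ∧
    0 ≤ s.getD 1 0 ∧ s.getD 1 0 ≤ s.getD 3 0 ∧ s.getD 3 0 < (board.length : Int) ∧
    0 ≤ s.getD 2 0 ∧ s.getD 2 0 ≤ s.getD 4 0 ∧ s.getD 4 0 < ((board.getD 0 []).length : Int))
instance (board : List (List Int)) (skill : List (List Int)) : Decidable (Pre_solution board skill) := by
  unfold Pre_solution; infer_instance

def pvWitness_solution : List (List Int) × List (List Int) :=
  ([[5, 5, 5], [1, 1, 1]], [[1, 0, 0, 1, 1, 4], [2, 0, 1, 0, 2, 2]])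

def Spec_solution (board : List (List Int)) (skill : List (List Int)) (out : Int) : Prop := out = solution_alt board skill
instance (board : List (List Int)) (skill : List (List Int)) (out : Int) : Decidable (Spec_solution board skill out) := by unfold Spec_solution; infer_instance

-- ===== CLAIM (what is proved, stated in full; the proofs are below) =====
def Claim_equal_solution : Prop := ∀ (board : List (List Int)) (skill : List (List Int)), Dom_solution board skill → Pre_solution board skill → Spec_solution board skill (solution board skill)

-- ===== LEMMAS AND PROOFS =====

-- shape of a grid: R rows, each of length C
def pvSh (d : List (List Int)) (R C : Nat) : Prop :=
  d.length = R ∧ ∀ (i : Nat) (h : i < d.length), d[i].length = C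

-- a skill row valid for an n×m board
def pvValid (n m : Nat) (s : List Int) : Prop :=
  s.length = 6 ∧ 0 ≤ s.getD 1 0 ∧ s.getD 1 0 ≤ s.getD 3 0 ∧ s.getD 3 0 < (n : Int) ∧
  0 ≤ s.getD 2 0 ∧ s.getD 2 0 ≤ s.getD 4 0 ∧ s.getD 4 0 < (m : Int)

-- the four corner deltas one skill writes into the difference array
def pvCorner (s : List Int) (x y : Int) : Int :=
  let r1 := s.getD 1 0; let c1 := s.getD 2 0; let r2 := s.getD 3 0; let c2 := s.getD 4 0
  let dg := if s.getD 0 0 = 1 then -(s.getD 5 0) else s.getD 5 0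
  (if x = r1 ∧ y = c1 then dg else 0) + (if x = r1 ∧ y = c2 + 1 then -dg else 0) +
  (if x = r2 + 1 ∧ y = c1 then -dg else 0) + (if x = r2 + 1 ∧ y = c2 + 1 then dg else 0)

-- the per-cell contribution of one skill as B computes it
def pvHit (i j : Int) (s : List Int) : Int :=
  match s with
  | [t, r1, c1, r2, c2, d] =>
    if r1 ≤ i ∧ i ≤ r2 ∧ c1 ≤ j ∧ j ≤ c2 then (if t = 1 then -d else d) else 0
  | _ => 0

lemma pvGetD_modify_add (l : List Int) (c j : Nat) (δ : Int) (hc : c < l.length) :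
    (l.modify c (fun x => x + δ)).getD j 0 = if j = c then l.getD j 0 + δ else l.getD j 0 := by
  by_cases hj : j < l.length
  · rw [List.getD_eq_getElem _ _ (by simpa using hj), List.getD_eq_getElem _ _ hj,
      List.getElem_modify]
    by_cases e : j = c
    · simp [e]
    · have e' : ¬ c = j := fun h => e h.symm
      simp [e, e']
  · rw [List.getD_eq_default _ _ (by simpa using Nat.le_of_not_lt hj),
      List.getD_eq_default _ _ (Nat.le_of_not_lt hj)]
    have : ¬ j = c := by omega
    simp [this]

lemma pvSh_modify (d : List (List Int)) (R C I : Nat) (f : List Int → List Int)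
    (hf : ∀ row, (f row).length = row.length) (h : pvSh d R C) :
    pvSh (d.modify I f) R C := by
  obtain ⟨h1, h2⟩ := h
  refine ⟨by simpa using h1, ?_⟩
  intro a ha
  have ha' : a < d.length := by simpa using ha
  rw [List.getElem_modify]
  split
  · rw [hf]; exact h2 a ha'
  · exact h2 a ha'

lemma pvSh_addN (d : List (List Int)) (R C i j : Nat) (δ : Int) (h : pvSh d R C) :
    pvSh (pvAddN d i j δ) R C :=
  pvSh_modify d R C i _ (fun _row => List.length_modify ..) h

lemma pvGet2_addN (d : List (List Int)) (R C r c i j : Nat) (δ : Int)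
    (h : pvSh d R C) (hr : r < R) (hc : c < C) :
    pvGet2 (pvAddN d r c δ) i j = if i = r ∧ j = c then pvGet2 d i j + δ else pvGet2 d i j := by
  obtain ⟨h1, h2⟩ := h
  unfold pvGet2 pvAddN
  by_cases hi : i < d.length
  · have hlen : i < (d.modify r (fun row => row.modify c fun x => x + δ)).length := by
      simpa using hi
    have hrow : (d.modify r (fun row => row.modify c fun x => x + δ)).getD i []
        = if r = i then d[i].modify c (fun x => x + δ) else d[i] := by
      rw [List.getD_eq_getElem _ _ hlen, List.getElem_modify]
    rw [hrow, List.getD_eq_getElem d [] hi]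
    by_cases e : r = i
    · subst e
      have hcl : c < d[r].length := by rw [h2 r hi]; exact hc
      rw [if_pos rfl, pvGetD_modify_add _ _ _ _ hcl]
      by_cases ej : j = c <;> simp [ej]
    · have e' : ¬ i = r := fun hh => e hh.symm
      simp [e, e']
  · have hi' : d.length ≤ i := Nat.le_of_not_lt hi
    have h1' : (d.modify r (fun row => row.modify c fun x => x + δ)).length ≤ i := by
      simpa using hi'
    rw [List.getD_eq_default _ _ h1', List.getD_eq_default _ _ hi']
    have : ¬ i = r := by omega
    simp [this]

lemma pvAddI_nonneg (d : List (List Int)) (i j δ : Int) (hi : 0 ≤ i) (hj : 0 ≤ j) :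
    pvAddI d i j δ = pvAddN d i.toNat j.toNat δ := by
  unfold pvAddI pvAddN
  rw [if_neg (by omega)]
  congr 1
  funext row
  rw [if_neg (by omega)]

lemma pvSh_addI (d : List (List Int)) (R C : Nat) (i j δ : Int) (h : pvSh d R C) :
    pvSh (pvAddI d i j δ) R C :=
  pvSh_modify d R C _ _ (fun _row => List.length_modify ..) h

lemma pvSh_applySkill (d : List (List Int)) (R C : Nat) (s : List Int) (h : pvSh d R C) :
    pvSh (pvApplySkill d s) R C := by
  unfold pvApplySkill
  split
  · exact pvSh_addI _ _ _ _ _ _ (pvSh_addI _ _ _ _ _ _ (pvSh_addI _ _ _ _ _ _ (pvSh_addI _ _ _ _ _ _ h)))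
  · exact h

lemma pvGet2_applySkill (d : List (List Int)) (n m : Nat) (s : List Int)
    (h : pvSh d (n + 1) (m + 1)) (hs : pvValid n m s) (i j : Nat) :
    pvGet2 (pvApplySkill d s) i j = pvGet2 d i j + pvCorner s (i : Int) (j : Int) := by
  obtain ⟨hlen, hv1, hv2, hv3, hv4, hv5, hv6⟩ := hs
  rcases s with _ | ⟨t, _ | ⟨r1, _ | ⟨c1, _ | ⟨r2, _ | ⟨c2, _ | ⟨d0, _ | ⟨x, rest⟩⟩⟩⟩⟩⟩⟩ <;>
    simp only [List.length_cons, List.length_nil] at hlen <;> try omega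
  simp only [List.getD_cons_zero, List.getD_cons_succ] at hv1 hv2 hv3 hv4 hv5 hv6
  simp only [pvApplySkill, pvCorner, List.getD_cons_zero, List.getD_cons_succ]
  rw [pvAddI_nonneg _ _ _ _ (by omega) (by omega), pvAddI_nonneg _ _ _ _ (by omega) (by omega),
    pvAddI_nonneg _ _ _ _ (by omega) (by omega), pvAddI_nonneg _ _ _ _ (by omega) (by omega)]
  have sh1 := pvSh_addN _ _ _ r1.toNat c1.toNat (if t = 1 then -d0 else d0) h
  have sh2 := pvSh_addN _ _ _ r1.toNat (c2 + 1).toNat (-(if t = 1 then -d0 else d0)) sh1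
  have sh3 := pvSh_addN _ _ _ (r2 + 1).toNat c1.toNat (-(if t = 1 then -d0 else d0)) sh2
  rw [pvGet2_addN _ (n + 1) (m + 1) _ _ i j _ sh3 (by omega) (by omega),
    pvGet2_addN _ (n + 1) (m + 1) _ _ i j _ sh2 (by omega) (by omega),
    pvGet2_addN _ (n + 1) (m + 1) _ _ i j _ sh1 (by omega) (by omega),
    pvGet2_addN _ (n + 1) (m + 1) _ _ i j _ h (by omega) (by omega)]
  have e1 : (i = r1.toNat ∧ j = c1.toNat) ↔ ((i : Int) = r1 ∧ (j : Int) = c1) := by omega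
  have e2 : (i = r1.toNat ∧ j = (c2 + 1).toNat) ↔ ((i : Int) = r1 ∧ (j : Int) = c2 + 1) := by
    omega
  have e3 : (i = (r2 + 1).toNat ∧ j = c1.toNat) ↔ ((i : Int) = r2 + 1 ∧ (j : Int) = c1) := by
    omega
  have e4 : (i = (r2 + 1).toNat ∧ j = (c2 + 1).toNat)
      ↔ ((i : Int) = r2 + 1 ∧ (j : Int) = c2 + 1) := by omega
  simp only [e1, e2, e3, e4]
  split_ifs <;> ring1

lemma pvSh_skillFold (skill : List (List Int)) (d : List (List Int)) (R C : Nat)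
    (h : pvSh d R C) : pvSh (skill.foldl pvApplySkill d) R C := by
  induction skill generalizing d with
  | nil => exact h
  | cons s rest ih => exact ih _ (pvSh_applySkill _ _ _ _ h)

lemma pvGet2_skillFold (skill : List (List Int)) (d : List (List Int)) (n m : Nat)
    (h : pvSh d (n + 1) (m + 1)) (hv : ∀ s ∈ skill, pvValid n m s) (i j : Nat) :
    pvGet2 (skill.foldl pvApplySkill d) i j
      = pvGet2 d i j + (skill.map (fun s => pvCorner s (i : Int) (j : Int))).sum := by
  induction skill generalizing d with
  | nil => simp
  | cons s rest ih =>
    have hs := hv s (by simp)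
    rw [List.foldl_cons, ih _ (pvSh_applySkill _ _ _ _ h) (fun s hs' => hv s (by simp [hs'])),
      pvGet2_applySkill _ _ _ _ h hs]
    simp [add_assoc]

lemma pvSh_rowInner (d : List (List Int)) (R C i k : Nat) (h : pvSh d R C) :
    pvSh ((List.range k).foldl (fun d j => pvAddN d i (j + 1) (pvGet2 d i j)) d) R C := by
  induction k with
  | zero => simpa using h
  | succ k ih =>
    rw [List.range_succ, List.foldl_append]
    simpa using pvSh_addN _ _ _ _ _ _ ih

lemma pvRowInner (d : List (List Int)) (n m i : Nat)
    (h : pvSh d (n + 1) (m + 1)) (hi : i < n + 1) :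
    ∀ k, k < m + 1 → ∀ i' j', j' < m + 1 →
      pvGet2 ((List.range k).foldl (fun d j => pvAddN d i (j + 1) (pvGet2 d i j)) d) i' j'
        = if i' = i ∧ j' ≤ k then ∑ t ∈ Finset.range (j' + 1), pvGet2 d i t
          else pvGet2 d i' j' := by
  intro k
  induction k with
  | zero =>
    intro _ i' j' hj'
    simp only [List.range_zero, List.foldl_nil]
    by_cases hc : i' = i ∧ j' ≤ 0
    · obtain ⟨hii, hjj⟩ := hc
      have hj0 : j' = 0 := by omega
      subst hii; subst hj0
      simp
    · rw [if_neg hc]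
  | succ k ih =>
    intro hk i' j' hj'
    rw [List.range_succ, List.foldl_append, List.foldl_cons, List.foldl_nil]
    have shF : pvSh ((List.range k).foldl (fun d j => pvAddN d i (j + 1) (pvGet2 d i j)) d)
        (n + 1) (m + 1) := pvSh_rowInner _ _ _ _ _ h
    rw [pvGet2_addN _ (n + 1) (m + 1) i (k + 1) i' j' _ shF hi (by omega)]
    rw [ih (by omega) i' j' hj', ih (by omega) i k (by omega),
      if_pos (⟨rfl, le_refl k⟩ : i = i ∧ k ≤ k)]
    by_cases hc : i' = i ∧ j' = k + 1
    · obtain ⟨hii, hjj⟩ := hc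
      subst hii; subst hjj
      rw [if_pos ⟨rfl, rfl⟩, if_neg (by omega), if_pos ⟨rfl, by omega⟩]
      conv_rhs => rw [Finset.sum_range_succ]
      ring
    · rw [if_neg hc]
      by_cases hc2 : i' = i ∧ j' ≤ k
      · rw [if_pos hc2, if_pos ⟨hc2.1, by omega⟩]
      · rw [if_neg hc2]
        have hnot : ¬ (i' = i ∧ j' ≤ k + 1) := by
          rintro ⟨a, b⟩
          rcases Nat.lt_or_ge j' (k + 1) with hlt | hge
          · exact hc2 ⟨a, by omega⟩
          · exact hc ⟨a, by omega⟩
        rw [if_neg hnot]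

lemma pvSh_rowOuter (d : List (List Int)) (R C k m : Nat) (h : pvSh d R C) :
    pvSh ((List.range k).foldl (fun d i =>
      (List.range m).foldl (fun d j => pvAddN d i (j + 1) (pvGet2 d i j)) d) d) R C := by
  induction k with
  | zero => simpa using h
  | succ k ih =>
    rw [List.range_succ, List.foldl_append]
    simpa using pvSh_rowInner _ _ _ _ _ ih

lemma pvRowOuter (d : List (List Int)) (n m : Nat) (h : pvSh d (n + 1) (m + 1)) :
    ∀ k, k ≤ n → ∀ i' j', i' < n + 1 → j' < m + 1 →
      pvGet2 ((List.range k).foldl (fun d i =>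
          (List.range m).foldl (fun d j => pvAddN d i (j + 1) (pvGet2 d i j)) d) d) i' j'
        = if i' < k then ∑ t ∈ Finset.range (j' + 1), pvGet2 d i' t
          else pvGet2 d i' j' := by
  intro k
  induction k with
  | zero =>
    intro _ i' j' _ _
    simp only [List.range_zero, List.foldl_nil]
    rw [if_neg (by omega)]
  | succ k ih =>
    intro hk i' j' hi' hj'
    rw [List.range_succ, List.foldl_append, List.foldl_cons, List.foldl_nil]
    have shF : pvSh ((List.range k).foldl (fun d i =>
        (List.range m).foldl (fun d j => pvAddN d i (j + 1) (pvGet2 d i j)) d) d)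
        (n + 1) (m + 1) := pvSh_rowOuter _ _ _ _ _ h
    rw [pvRowInner _ n m k shF (by omega) m (by omega) i' j' hj']
    have hFk : ∀ t, t < m + 1 →
        pvGet2 ((List.range k).foldl (fun d i =>
          (List.range m).foldl (fun d j => pvAddN d i (j + 1) (pvGet2 d i j)) d) d) k t
          = pvGet2 d k t := by
      intro t ht
      rw [ih (by omega) k t (by omega) ht, if_neg (by omega)]
    by_cases hik : i' = k
    · rw [if_pos ⟨hik, by omega⟩, if_pos (by omega)]
      subst hik
      exact Finset.sum_congr rfl (fun t ht => hFk t (by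
        have := Finset.mem_range.mp ht; omega))
    · rw [if_neg (fun hcc => hik hcc.1), ih (by omega) i' j' hi' hj']
      by_cases hlt : i' < k
      · rw [if_pos hlt, if_pos (by omega)]
      · rw [if_neg hlt, if_neg (by omega)]

lemma pvSh_colInner (d : List (List Int)) (R C j k : Nat) (h : pvSh d R C) :
    pvSh ((List.range k).foldl (fun d i => pvAddN d (i + 1) j (pvGet2 d i j)) d) R C := by
  induction k with
  | zero => simpa using h
  | succ k ih =>
    rw [List.range_succ, List.foldl_append]
    simpa using pvSh_addN _ _ _ _ _ _ ih

lemma pvColInner (d : List (List Int)) (n m j : Nat)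
    (h : pvSh d (n + 1) (m + 1)) (hj : j < m + 1) :
    ∀ k, k < n + 1 → ∀ i' j', i' < n + 1 → j' < m + 1 →
      pvGet2 ((List.range k).foldl (fun d i => pvAddN d (i + 1) j (pvGet2 d i j)) d) i' j'
        = if j' = j ∧ i' ≤ k then ∑ t ∈ Finset.range (i' + 1), pvGet2 d t j
          else pvGet2 d i' j' := by
  intro k
  induction k with
  | zero =>
    intro _ i' j' _ _
    simp only [List.range_zero, List.foldl_nil]
    by_cases hc : j' = j ∧ i' ≤ 0
    · obtain ⟨hjj, hii⟩ := hc
      have hi0 : i' = 0 := by omega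
      subst hjj; subst hi0
      simp
    · rw [if_neg hc]
  | succ k ih =>
    intro hk i' j' hi' hj'
    rw [List.range_succ, List.foldl_append, List.foldl_cons, List.foldl_nil]
    have shF : pvSh ((List.range k).foldl (fun d i => pvAddN d (i + 1) j (pvGet2 d i j)) d)
        (n + 1) (m + 1) := pvSh_colInner _ _ _ _ _ h
    rw [pvGet2_addN _ (n + 1) (m + 1) (k + 1) j i' j' _ shF (by omega) hj]
    rw [ih (by omega) i' j' hi' hj', ih (by omega) k j (by omega) hj,
      if_pos (⟨rfl, le_refl k⟩ : j = j ∧ k ≤ k)]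
    by_cases hc : i' = k + 1 ∧ j' = j
    · obtain ⟨hii, hjj⟩ := hc
      subst hii; subst hjj
      rw [if_pos ⟨rfl, rfl⟩, if_neg (by omega), if_pos ⟨rfl, by omega⟩]
      conv_rhs => rw [Finset.sum_range_succ]
      ring
    · rw [if_neg hc]
      by_cases hc2 : j' = j ∧ i' ≤ k
      · rw [if_pos hc2, if_pos ⟨hc2.1, by omega⟩]
      · rw [if_neg hc2]
        have hnot : ¬ (j' = j ∧ i' ≤ k + 1) := by
          rintro ⟨a, b⟩
          rcases Nat.lt_or_ge i' (k + 1) with hlt | hge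
          · exact hc2 ⟨a, by omega⟩
          · exact hc ⟨by omega, a⟩
        rw [if_neg hnot]

lemma pvSh_colOuter (d : List (List Int)) (R C k n : Nat) (h : pvSh d R C) :
    pvSh ((List.range k).foldl (fun d j =>
      (List.range n).foldl (fun d i => pvAddN d (i + 1) j (pvGet2 d i j)) d) d) R C := by
  induction k with
  | zero => simpa using h
  | succ k ih =>
    rw [List.range_succ, List.foldl_append]
    simpa using pvSh_colInner _ _ _ _ _ ih

lemma pvColOuter (d : List (List Int)) (n m : Nat) (h : pvSh d (n + 1) (m + 1)) :
    ∀ k, k ≤ m → ∀ i' j', i' < n + 1 → j' < m + 1 →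
      pvGet2 ((List.range k).foldl (fun d j =>
          (List.range n).foldl (fun d i => pvAddN d (i + 1) j (pvGet2 d i j)) d) d) i' j'
        = if j' < k then ∑ t ∈ Finset.range (i' + 1), pvGet2 d t j'
          else pvGet2 d i' j' := by
  intro k
  induction k with
  | zero =>
    intro _ i' j' _ _
    simp only [List.range_zero, List.foldl_nil]
    rw [if_neg (by omega)]
  | succ k ih =>
    intro hk i' j' hi' hj'
    rw [List.range_succ, List.foldl_append, List.foldl_cons, List.foldl_nil]
    have shF : pvSh ((List.range k).foldl (fun d j =>
        (List.range n).foldl (fun d i => pvAddN d (i + 1) j (pvGet2 d i j)) d) d)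
        (n + 1) (m + 1) := pvSh_colOuter _ _ _ _ _ h
    rw [pvColInner _ n m k shF (by omega) n (by omega) i' j' hi' hj']
    have hFk : ∀ t, t < n + 1 →
        pvGet2 ((List.range k).foldl (fun d j =>
          (List.range n).foldl (fun d i => pvAddN d (i + 1) j (pvGet2 d i j)) d) d) t k
          = pvGet2 d t k := by
      intro t ht
      rw [ih (by omega) t k ht (by omega), if_neg (by omega)]
    by_cases hjk : j' = k
    · rw [if_pos ⟨hjk, by omega⟩, if_pos (by omega)]
      subst hjk
      exact Finset.sum_congr rfl (fun t ht => hFk t (by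
        have := Finset.mem_range.mp ht; omega))
    · rw [if_neg (fun hcc => hjk hcc.1), ih (by omega) i' j' hi' hj']
      by_cases hlt : j' < k
      · rw [if_pos hlt, if_pos (by omega)]
      · rw [if_neg hlt, if_neg (by omega)]

lemma pvGet2_zero (R C i j : Nat) :
    pvGet2 (List.replicate R (List.replicate C (0 : Int))) i j = 0 := by
  unfold pvGet2
  by_cases hi : i < R
  · have : (List.replicate R (List.replicate C (0 : Int))).getD i [] = List.replicate C 0 := by
      rw [List.getD_eq_getElem _ _ (by simpa using hi), List.getElem_replicate]
    rw [this]
    by_cases hj : j < C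
    · rw [List.getD_eq_getElem _ _ (by simpa using hj), List.getElem_replicate]
    · rw [List.getD_eq_default _ _ (by simpa using Nat.le_of_not_lt hj)]
  · have : (List.replicate R (List.replicate C (0 : Int))).getD i [] = [] :=
      List.getD_eq_default _ _ (by simpa using Nat.le_of_not_lt hi)
    rw [this]
    simp

lemma pvSh_zero (R C : Nat) : pvSh (List.replicate R (List.replicate C (0 : Int))) R C := by
  refine ⟨by simp, ?_⟩
  intro a ha
  simp

-- counting fold = a + sum of indicators
lemma pvFoldl_add_shape (g : Int → Nat → Int) (f : Nat → Int)
    (hg : ∀ c x, g c x = c + f x) (k : Nat) (a : Int) :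
    (List.range k).foldl g a = a + ∑ x ∈ Finset.range k, f x := by
  induction k generalizing a with
  | zero => simp
  | succ k ih =>
    rw [List.range_succ, List.foldl_append, ih, Finset.sum_range_succ]
    simp [hg]
    ring

-- number of x < k whose cast equals a
lemma pvSumInd (k : Nat) (a : Int) :
    (∑ x ∈ Finset.range k, if (x : Int) = a then (1 : Int) else 0)
      = if 0 ≤ a ∧ a < (k : Int) then 1 else 0 := by
  induction k with
  | zero => simp
  | succ k ih =>
    rw [Finset.sum_range_succ, ih]
    split_ifs <;> push_cast at * <;> omega

lemma pvCorner_factor (s : List Int) (x y : Int) :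
    pvCorner s x y
      = (if s.getD 0 0 = 1 then -(s.getD 5 0) else s.getD 5 0)
        * ((if x = s.getD 1 0 then (1 : Int) else 0) - (if x = s.getD 3 0 + 1 then 1 else 0))
        * ((if y = s.getD 2 0 then (1 : Int) else 0) - (if y = s.getD 4 0 + 1 then 1 else 0)) := by
  simp only [pvCorner]
  generalize s.getD 0 0 = t
  generalize s.getD 5 0 = dd
  generalize s.getD 1 0 = r1
  generalize s.getD 2 0 = c1
  generalize s.getD 3 0 = r2
  generalize s.getD 4 0 = c2
  by_cases h1 : x = r1 <;> by_cases h2 : x = r2 + 1 <;>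
    by_cases h3 : y = c1 <;> by_cases h4 : y = c2 + 1 <;>
      simp only [h1, h2, h3, h4, if_true, if_false, and_self, and_true, true_and,
        if_pos, eq_self_iff_true] <;> split_ifs <;> first | ring1 | omega

-- double prefix sum of the corner deltas = in-rectangle indicator times the signed degree
lemma pvCorner_rect (s : List Int) (n m i j : Nat) (hs : pvValid n m s)
    (hi : i < n) (hj : j < m) :
    (∑ x ∈ Finset.range (i + 1), ∑ y ∈ Finset.range (j + 1), pvCorner s (x : Int) (y : Int))
      = pvHit (i : Int) (j : Int) s := by
  obtain ⟨hlen, hv1, hv2, hv3, hv4, hv5, hv6⟩ := hs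
  rcases s with _ | ⟨t, _ | ⟨r1, _ | ⟨c1, _ | ⟨r2, _ | ⟨c2, _ | ⟨d0, _ | ⟨x, rest⟩⟩⟩⟩⟩⟩⟩ <;>
    simp only [List.length_cons, List.length_nil] at hlen <;> try omega
  simp only [List.getD_cons_zero, List.getD_cons_succ] at hv1 hv2 hv3 hv4 hv5 hv6
  simp only [pvCorner_factor, pvHit, List.getD_cons_zero, List.getD_cons_succ]
  simp only [← Finset.mul_sum, ← Finset.sum_mul]
  rw [Finset.sum_sub_distrib, pvSumInd, pvSumInd, Finset.sum_sub_distrib, pvSumInd, pvSumInd]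
  generalize (if t = 1 then -d0 else d0) = dg
  split_ifs <;> first | ring1 | (push_cast at *; omega)

lemma pvSum_list_swap2 (l : List (List Int)) (k1 k2 : Nat) (f : List Int → Nat → Nat → Int) :
    (∑ x ∈ Finset.range k1, ∑ y ∈ Finset.range k2, (l.map (fun s => f s x y)).sum)
      = (l.map (fun s => ∑ x ∈ Finset.range k1, ∑ y ∈ Finset.range k2, f s x y)).sum := by
  induction l with
  | nil => simp
  | cons a l ih => simp [Finset.sum_add_distrib, ih]

lemma pvCellTotal_eq (skill : List (List Int)) (i j : Int) (v : Int) :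
    pvCellTotal skill i j v = v + (skill.map (pvHit i j)).sum := by
  have step : ∀ (v : Int) (s : List Int),
      (match s with
       | [t, r1, c1, r2, c2, d] =>
         if r1 ≤ i ∧ i ≤ r2 ∧ c1 ≤ j ∧ j ≤ c2 then v + (if t = 1 then -d else d) else v
       | _ => v) = v + pvHit i j s := by
    intro v s
    rcases s with _ | ⟨t, _ | ⟨r1, _ | ⟨c1, _ | ⟨r2, _ | ⟨c2, _ | ⟨d, _ | ⟨x, rest⟩⟩⟩⟩⟩⟩⟩ <;>
      simp [pvHit] <;> split_ifs <;> ring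
  induction skill generalizing v with
  | nil => simp [pvCellTotal]
  | cons s rest ih =>
    have h0 : pvCellTotal (s :: rest) i j v = pvCellTotal rest i j (v + pvHit i j s) := by
      simp only [pvCellTotal, List.foldl_cons, step]
    rw [h0, ih]
    simp [List.sum_cons]
    ring

lemma pvMain (board skill : List (List Int))
    (hrect : ∀ row ∈ board, row.length = (board.getD 0 []).length)
    (hv : ∀ s ∈ skill, pvValid board.length (board.getD 0 []).length s) :
    solution board skill = solution_alt board skill := by
  simp only [solution, solution_alt]
  set n := board.length with hn
  set m := (board.getD 0 []).length with hm
  set D1 := skill.foldl pvApplySkill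
      (List.replicate (n + 1) (List.replicate (m + 1) (0 : Int))) with hD1
  set D2 := (List.range n).foldl (fun d i =>
      (List.range m).foldl (fun d j => pvAddN d i (j + 1) (pvGet2 d i j)) d) D1 with hD2
  set D3 := (List.range m).foldl (fun d j =>
      (List.range n).foldl (fun d i => pvAddN d (i + 1) j (pvGet2 d i j)) d) D2 with hD3
  have sh1 : pvSh D1 (n + 1) (m + 1) := pvSh_skillFold _ _ _ _ (pvSh_zero _ _)
  have sh2 : pvSh D2 (n + 1) (m + 1) := pvSh_rowOuter _ _ _ _ _ sh1
  have hval : ∀ i j, i < n → j < m →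
      pvGet2 D3 i j = (skill.map (pvHit (i : Int) (j : Int))).sum := by
    intro i j hi hj
    rw [hD3, pvColOuter D2 n m sh2 m (le_refl m) i j (by omega) (by omega), if_pos (by omega)]
    have hstep : ∀ t ∈ Finset.range (i + 1),
        pvGet2 D2 t j = ∑ y ∈ Finset.range (j + 1), pvGet2 D1 t y := by
      intro t ht
      have ht' : t < n := by have := Finset.mem_range.mp ht; omega
      rw [hD2, pvRowOuter D1 n m sh1 n (le_refl n) t j (by omega) (by omega), if_pos ht']
    rw [Finset.sum_congr rfl hstep]
    have hbase : ∀ t y, pvGet2 D1 t y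
        = (skill.map (fun s => pvCorner s (t : Int) (y : Int))).sum := by
      intro t y
      rw [hD1, pvGet2_skillFold skill _ n m (pvSh_zero _ _) hv t y, pvGet2_zero, zero_add]
    rw [Finset.sum_congr rfl (fun t _ => Finset.sum_congr rfl (fun y _ => hbase t y))]
    rw [pvSum_list_swap2 skill (i + 1) (j + 1) (fun s x y => pvCorner s (x : Int) (y : Int))]
    exact congrArg List.sum (List.map_congr_left
      (fun s hs => pvCorner_rect s n m i j (hv s hs) hi hj))
  have hlenrow : ∀ i, i < n → (board.getD i []).length = m := by
    intro i hi
    rw [List.getD_eq_getElem _ _ hi]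
    exact hrect _ (List.getElem_mem hi)
  rw [pvFoldl_add_shape _ (fun i => ∑ j ∈ Finset.range m,
        if (board.getD i []).getD j 0 + pvGet2 D3 i j > 0 then (1 : Int) else 0)
      (fun c i => pvFoldl_add_shape _
        (fun j => if (board.getD i []).getD j 0 + pvGet2 D3 i j > 0 then (1 : Int) else 0)
        (fun c j => by beta_reduce; split_ifs <;> ring) m c) n 0]
  rw [pvFoldl_add_shape _ (fun i => ∑ j ∈ Finset.range (board.getD i []).length,
        if pvCellTotal skill (i : Int) (j : Int) ((board.getD i []).getD j 0) > 0
        then (1 : Int) else 0)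
      (fun c i => pvFoldl_add_shape _
        (fun j => if pvCellTotal skill (i : Int) (j : Int) ((board.getD i []).getD j 0) > 0
          then (1 : Int) else 0)
        (fun c j => by beta_reduce; split_ifs <;> ring) _ c) n 0]
  rw [zero_add, zero_add]
  refine Finset.sum_congr rfl (fun i hi => ?_)
  have hi' : i < n := Finset.mem_range.mp hi
  rw [hlenrow i hi']
  refine Finset.sum_congr rfl (fun j hj => ?_)
  have hj' : j < m := Finset.mem_range.mp hj
  rw [pvCellTotal_eq, hval i j hi' hj']

-- ===== VERDICT (by name: the statement is the Claim_ definition above) =====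
theorem solution_spec : Claim_equal_solution := by
  intro board skill _ hpre
  obtain ⟨hne, hrect, hsk⟩ := hpre
  exact pvMain board skill hrect hsk
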